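-- pv_equiv track=rewrite | github.com/mukeswebrian/scheduling-tool-dist | controller.py | pick_least_flexible_volunteer
-- ===== SOURCE A (Python) =====
-- def pick_least_flexible_volunteer(vol_sess_lists):
--
--     vol_flex_scores = {}
--     for volunteer_id in vol_sess_lists.keys():
--         vol_flex_scores[volunteer_id] = len(vol_sess_lists[volunteer_id])
--
--     max_score = min(vol_flex_scores.values())
--
--     pick =''
--
--
--     for volunteer_id in vol_flex_scores.keys():
--         if vol_flex_scores[volunteer_id] == max_score:
--             pick = volunteer_id
--             break
--
--     return pick
-- ===== SOURCE B (Python) =====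
-- def pick_least_flexible_volunteer(vol_sess_lists):
--     # Inverse index: session-count -> first volunteer with that count;
--     # answer is the bucket of the smallest count present.
--     first_by_count = {}
--     for volunteer_id, sessions in vol_sess_lists.items():
--         first_by_count.setdefault(len(sessions), volunteer_id)
--     return first_by_count[min(first_by_count)]
-- ===== Notes on version B (the rewrite author's own statement) =====
-- stated objective: alternative
-- what changed: A scores every volunteer in a dict keyed by volunteer, takes min() of the scores and rescans the keys for the first match; B builds the inverse index (session-count -> first volunteer with that count) in one pass and returns the bucket of the smallest count, so no per-volunteer score dict and no rescan exist.
import Mathlib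
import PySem

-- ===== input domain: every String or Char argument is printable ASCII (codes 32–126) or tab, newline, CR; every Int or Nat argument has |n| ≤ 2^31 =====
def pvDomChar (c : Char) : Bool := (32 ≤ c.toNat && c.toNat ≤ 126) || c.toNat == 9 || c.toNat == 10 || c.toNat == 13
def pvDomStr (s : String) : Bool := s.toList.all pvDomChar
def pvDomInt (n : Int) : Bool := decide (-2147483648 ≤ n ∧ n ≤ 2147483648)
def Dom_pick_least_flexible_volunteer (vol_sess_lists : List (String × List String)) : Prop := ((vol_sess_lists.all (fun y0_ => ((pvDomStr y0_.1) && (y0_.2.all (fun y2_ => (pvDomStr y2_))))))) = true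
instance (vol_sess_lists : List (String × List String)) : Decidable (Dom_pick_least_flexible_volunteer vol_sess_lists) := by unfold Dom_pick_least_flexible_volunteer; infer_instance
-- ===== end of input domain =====

-- B replaces A's per-volunteer score dict + min-of-values + rescan by an inverse index (session-count -> first volunteer), looked up at the smallest count; alternative algorithm, same cost.


-- ===== PORT A =====
-- the final 'for … if score == max_score: pick = k; break' loop of A
def pickLoopA (d : PySem.Dict String Int) (m : Int) (pick : String) : List String → String
  | [] => pick
  | k :: rest => if d.getD k 0 = m then k else pickLoopA d m pick rest

def pick_least_flexible_volunteer (vol_sess_lists : List (String × List String)) : String :=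
  let vol_flex_scores : PySem.Dict String Int :=
    (vol_sess_lists.map Prod.fst).foldl
      (fun d k => d.insert k (((PySem.Dict.mk vol_sess_lists).getD k []).length : Int))
      (PySem.Dict.mk [])
  match PySem.List.min? vol_flex_scores.values (fun x => x) with
  | none => ""  -- Python: min() raises ValueError here (empty dict); excluded by Pre_
  | some max_score => pickLoopA vol_flex_scores max_score "" vol_flex_scores.keys

-- ===== PORT B =====
def pick_least_flexible_volunteer_alt (vol_sess_lists : List (String × List String)) : String :=
  let first_by_count : PySem.Dict Int String :=
    vol_sess_lists.foldl (fun d p => d.setdefault ((p.2.length : Int)) p.1) (PySem.Dict.mk [])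
  match PySem.List.min? first_by_count.keys (fun x => x) with
  | none => ""  -- Python: min() raises ValueError here (empty dict); excluded by Pre_
  | some m => first_by_count.getD m ""  -- Python d[m]: m is min of the keys, always present

-- ===== PRECONDITION & SPEC =====
-- Pre_ excludes the empty dict, on which A's min() raises ValueError (B's does too), and association
-- lists with duplicate keys, which do not represent any Python dict (the actual input type).
def Pre_pick_least_flexible_volunteer (vol_sess_lists : List (String × List String)) : Prop :=
  vol_sess_lists ≠ [] ∧ (vol_sess_lists.map Prod.fst).Nodup
instance (vol_sess_lists : List (String × List String)) : Decidable (Pre_pick_least_flexible_volunteer vol_sess_lists) := by unfold Pre_pick_least_flexible_volunteer; infer_instance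
def pvWitness_pick_least_flexible_volunteer : (List (String × List String)) :=
  [("a", ["s1", "s2"]), ("b", ["s1"]), ("c", ["s3"])]

def Spec_pick_least_flexible_volunteer (vol_sess_lists : List (String × List String)) (out : String) : Prop := out = pick_least_flexible_volunteer_alt vol_sess_lists
instance (vol_sess_lists : List (String × List String)) (out : String) : Decidable (Spec_pick_least_flexible_volunteer vol_sess_lists out) := by unfold Spec_pick_least_flexible_volunteer; infer_instance

-- ===== CLAIM (what is proved, stated in full; the proofs are below) =====
def Claim_equal_pick_least_flexible_volunteer : Prop := ∀ (vol_sess_lists : List (String × List String)), Dom_pick_least_flexible_volunteer vol_sess_lists → Pre_pick_least_flexible_volunteer vol_sess_lists → Spec_pick_least_flexible_volunteer vol_sess_lists (pick_least_flexible_volunteer vol_sess_lists)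

-- ===== LEMMAS AND PROOFS =====

-- proof-side copy of A's final loop, with a plain score function instead of the dict
def pickLoopG (g : String → Int) (m : Int) (pick : String) : List String → String
  | [] => pick
  | k :: rest => if g k = m then k else pickLoopG g m pick rest

lemma pickLoopA_eq_pickLoopG (d : PySem.Dict String Int) (g : String → Int) (m : Int) (pick : String) :
    ∀ ks : List String, (∀ k ∈ ks, d.getD k 0 = g k) → pickLoopA d m pick ks = pickLoopG g m pick ks := by
  intro ks
  induction ks with
  | nil => intro _; rfl
  | cons k rest ih =>
      intro h
      simp only [pickLoopA, pickLoopG, h k (by simp)]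
      split_ifs with hk
      · rfl
      · exact ih (fun x hx => h x (by simp [hx]))

-- A's scan for the first key with the minimal score IS find? with a default
lemma pickLoopG_eq_find? (g : String → Int) (m : Int) (pick : String) :
    ∀ ks : List String, pickLoopG g m pick ks = (ks.find? (fun k => g k == m)).getD pick := by
  intro ks
  induction ks with
  | nil => rfl
  | cons k rest ih =>
      simp only [pickLoopG, List.find?_cons]
      by_cases h : g k = m
      · simp [h]
      · have hb : (g k == m) = false := by simp [h]
        simp [h, hb, ih]

-- the score-building loop of A over distinct keys is a literal association list
lemma items_fold (g : String → Int) (ks : List String) (hnd : ks.Nodup) :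
    (ks.foldl (fun d x => d.insert x (g x)) (PySem.Dict.mk [])).items
      = ks.map (fun x => (x, g x)) := by
  have h := PySem.Dict.items_foldl_insert_fresh (κ := String) (ν := Int)
      ks (fun x => x) g (PySem.Dict.mk [])
      (fun a _ => by simp [PySem.Dict.contains])
      (by simpa using hnd)
  simpa only [List.nil_append] using h

lemma values_fold (g : String → Int) (ks : List String) (hnd : ks.Nodup) :
    (ks.foldl (fun d x => d.insert x (g x)) (PySem.Dict.mk [])).values = ks.map g := by
  simp only [PySem.Dict.values, items_fold g ks hnd, List.map_map]
  rfl

lemma keys_fold (g : String → Int) (ks : List String) (hnd : ks.Nodup) :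
    (ks.foldl (fun d x => d.insert x (g x)) (PySem.Dict.mk [])).keys = ks := by
  have hitems :
      (ks.foldl (fun d x => d.insert x (g x)) (PySem.Dict.mk [])).keys
        = ((ks.foldl (fun d x => d.insert x (g x)) (PySem.Dict.mk [])).items).map Prod.fst := rfl
  have hfun : (Prod.fst ∘ fun x : String => ((x, g x) : String × Int)) = id := by
    funext x; rfl
  rw [hitems, items_fold g ks hnd, List.map_map, hfun, List.map_id]

-- B's setdefault loop: lookup in the inverse index = first element with that key
lemma get?_fold_setdefault {α : Type} (key : α → Int) (val : α → String) :
    ∀ (l : List α) (d : PySem.Dict Int String) (n : Int),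
      (l.foldl (fun d p => d.setdefault (key p) (val p)) d).get? n
        = (d.get? n).or ((l.find? (fun p => (key p == n))).map val) := by
  intro l
  induction l with
  | nil => intro d n; simp
  | cons p l ih =>
      intro d n
      simp only [List.foldl_cons, List.find?_cons]
      by_cases h : key p = n
      · subst h
        rw [ih, PySem.Dict.get?_setdefault_self]
        simp only [beq_self_eq_true, Option.map_some]
        cases hd : d.get? (key p) <;> simp [Option.or]
      · have hne : n ≠ key p := fun hh => h hh.symm
        rw [ih, PySem.Dict.get?_setdefault_of_ne d (val p) hne]
        have hb : (key p == n) = false := by simp [h]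
        simp [hb]

-- min? with the identity key depends only on the members of the (nonempty) list
lemma min?_id_same_members (x y : List Int) (hx : x ≠ []) (hy : y ≠ [])
    (hmem : ∀ a : Int, a ∈ x ↔ a ∈ y) :
    PySem.List.min? x (fun v => v) = PySem.List.min? y (fun v => v) := by
  cases hxm : PySem.List.min? x (fun v => v) with
  | none => exact absurd ((PySem.List.min?_eq_none_iff x _).mp hxm) hx
  | some a =>
    cases hym : PySem.List.min? y (fun v => v) with
    | none => exact absurd ((PySem.List.min?_eq_none_iff y _).mp hym) hy
    | some b =>
      have ha : a ∈ x := PySem.List.min?_mem hxm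
      have hb : b ∈ y := PySem.List.min?_mem hym
      have h1 : a ≤ b := PySem.List.min?_isMin hxm b ((hmem b).mpr hb)
      have h2 : b ≤ a := PySem.List.min?_isMin hym a ((hmem a).mp ha)
      have : a = b := le_antisymm h1 h2
      simp [this]

-- find? is determined by the predicate's values on the list's members
lemma find?_congr_mem {α : Type} (p q : α → Bool) :
    ∀ l : List α, (∀ x ∈ l, p x = q x) → l.find? p = l.find? q := by
  intro l
  induction l with
  | nil => intro _; rfl
  | cons x l ih =>
      intro h
      simp only [List.find?_cons, h x (by simp)]
      cases hq : q x with
      | true => rfl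
      | false => exact ih (fun z hz => h z (by simp [hz]))

lemma ports_eq_core (g : String → Int) (h : String × List String → Int)
    (l : List (String × List String)) (hne : l ≠ [])
    (hnd : (l.map Prod.fst).Nodup) (hgh : ∀ p ∈ l, g p.1 = h p) :
    (match PySem.List.min?
        ((l.map Prod.fst).foldl (fun (d : PySem.Dict String Int) k => d.insert k (g k)) (PySem.Dict.mk ([] : List (String × Int)))).values
        (fun x => x) with
     | none => ""
     | some max_score =>
        pickLoopA ((l.map Prod.fst).foldl (fun (d : PySem.Dict String Int) k => d.insert k (g k)) (PySem.Dict.mk ([] : List (String × Int))))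
          max_score ""
          ((l.map Prod.fst).foldl (fun (d : PySem.Dict String Int) k => d.insert k (g k)) (PySem.Dict.mk ([] : List (String × Int)))).keys)
      = (match PySem.List.min?
            (l.foldl (fun (d : PySem.Dict Int String) p => d.setdefault (h p) p.1) (PySem.Dict.mk ([] : List (Int × String)))).keys
            (fun x => x) with
         | none => ""
         | some m => (l.foldl (fun (d : PySem.Dict Int String) p => d.setdefault (h p) p.1) (PySem.Dict.mk ([] : List (Int × String)))).getD m "") := by
  have hvals : (l.map Prod.fst).map g = l.map h := by
    rw [List.map_map]; exact List.map_congr_left hgh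
  have hBget : ∀ n : Int,
      (l.foldl (fun (d : PySem.Dict Int String) p => d.setdefault (h p) p.1) (PySem.Dict.mk ([] : List (Int × String)))).get? n
        = (l.find? (fun p => (h p == n))).map Prod.fst := by
    intro n
    have := get?_fold_setdefault h Prod.fst l (PySem.Dict.mk []) n
    simpa [Option.or] using this
  have hBkeys : ∀ n : Int,
      (n ∈ (l.foldl (fun (d : PySem.Dict Int String) p => d.setdefault (h p) p.1) (PySem.Dict.mk ([] : List (Int × String)))).keys)
        ↔ n ∈ l.map h := by
    intro n
    rw [← PySem.Dict.contains_iff_mem_keys, PySem.Dict.contains_eq_isSome_get?, hBget n]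
    simp only [Option.isSome_map]
    rw [List.find?_isSome]
    simp only [beq_iff_eq, List.mem_map]
  obtain ⟨p0, rest, rfl⟩ : ∃ p rest, l = p :: rest := by
    cases l with
    | nil => exact absurd rfl hne
    | cons p rest => exact ⟨p, rest, rfl⟩
  have hBne : (((p0 :: rest).foldl (fun (d : PySem.Dict Int String) p => d.setdefault (h p) p.1) (PySem.Dict.mk ([] : List (Int × String)))).keys) ≠ [] := by
    intro hcontra
    have := (hBkeys (h p0)).mpr (by simp)
    rw [hcontra] at this
    exact absurd this (List.not_mem_nil)
  have hmins :
      PySem.List.min? (((p0 :: rest).foldl (fun (d : PySem.Dict Int String) p => d.setdefault (h p) p.1) (PySem.Dict.mk ([] : List (Int × String)))).keys) (fun v => v)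
        = PySem.List.min? ((p0 :: rest).map h) (fun v => v) := by
    apply min?_id_same_members _ _ hBne (by simp)
    intro a
    exact hBkeys a
  rw [values_fold g _ hnd, hvals, ← hmins]
  cases hm : PySem.List.min? (((p0 :: rest).foldl (fun (d : PySem.Dict Int String) p => d.setdefault (h p) p.1) (PySem.Dict.mk ([] : List (Int × String)))).keys) (fun v => v) with
  | none => exact absurd ((PySem.List.min?_eq_none_iff _ _).mp hm) hBne
  | some M =>
    dsimp only
    -- A side: first key whose score is M
    have hgetD : ∀ x ∈ (p0 :: rest).map Prod.fst,
        (((p0 :: rest).map Prod.fst).foldl (fun (d : PySem.Dict String Int) x => d.insert x (g x)) (PySem.Dict.mk ([] : List (String × Int)))).getD x 0 = g x := by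
      intro x hx
      refine PySem.Dict.getD_of_mem_items _ ?_ ?_ 0
      · rw [items_fold g _ hnd]; exact List.mem_map_of_mem hx
      · rw [keys_fold g _ hnd]; exact hnd
    rw [keys_fold g _ hnd, pickLoopA_eq_pickLoopG _ g _ _ _ hgetD, pickLoopG_eq_find?]
    -- B side: first pair whose count is M
    rw [PySem.Dict.getD_eq_get?_getD, hBget M]
    -- the two find?s agree: find? over keys = find? over pairs, mapped to the key
    rw [List.find?_map]
    rw [find?_congr_mem ((fun k => g k == M) ∘ Prod.fst) (fun p => (h p == M)) _
        (fun p hp => by simp only [Function.comp]; rw [hgh p hp])]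

lemma ports_eq (l : List (String × List String)) (hne : l ≠ [])
    (hnd : (l.map Prod.fst).Nodup) :
    pick_least_flexible_volunteer l = pick_least_flexible_volunteer_alt l := by
  have hgh : ∀ p ∈ l, (((PySem.Dict.mk l).getD p.1 []).length : Int) = ((p.2.length : Int)) := by
    intro p hp
    have : (PySem.Dict.mk l).getD p.1 [] = p.2 :=
      PySem.Dict.getD_of_mem_items (d := PySem.Dict.mk l) hp hnd []
    rw [this]
  exact ports_eq_core (fun k => (((PySem.Dict.mk l).getD k []).length : Int))
    (fun p => ((p.2.length : Int))) l hne hnd hgh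

-- ===== VERDICT (by name: the statement is the Claim_ definition above) =====
theorem pick_least_flexible_volunteer_spec : Claim_equal_pick_least_flexible_volunteer := by
  intro l _ hpre
  exact ports_eq l hpre.1 hpre.2
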